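-- pv_equiv track=rewrite | github.com/Wolfiee1911/AutomatedRequirementWriting | dynamo.py | adjust_dialect
-- ===== SOURCE A (Python) =====
-- def adjust_dialect(text, dialect="American"):
--     if dialect == "British":
--         replacements = {
--             "color": "colour",
--             "organize": "organise",
--             "realize": "realise",
--             "behavior": "behaviour",
--             "center": "centre",
--             "meter": "metre"
--         }
--         for us, uk in replacements.items():
--             text = text.replace(us, uk)
--     return text
-- ===== SOURCE B (Python) =====
-- def adjust_dialect(text, dialect="American"):
--     if dialect != "British":
--         return text
--     reps = [("color", "colour"), ("organize", "organise"), ("realize", "realise"),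
--             ("behavior", "behaviour"), ("center", "centre"), ("meter", "metre")]
--     out = []
--     i = 0
--     n = len(text)
--     while i < n:
--         for us, uk in reps:
--             if text.startswith(us, i):
--                 out.append(uk)
--                 i += len(us)
--                 break
--         else:
--             out.append(text[i])
--             i += 1
--     return "".join(out)
-- ===== Notes on version B (the rewrite author's own statement) =====
-- stated objective: alternative
-- what changed: Replaces A's six sequential whole-string .replace passes (each rescanning the full text, with replaced output visible to later passes) by a single left-to-right cursor scan that substitutes the first matching key at each position and never rescans replaced output.
-- intended difference: On British texts where two replacement targets overlap (an occurrence of color/behavior/center/meter immediately followed by ealize, or of behavior followed by ganize) A's sequential passes substitute both overlapping targets, yielding a doubly-substituted hybrid, while B substitutes only the leftmost target, the standard leftmost-match semantics intended for a fixed substitution table. — e.g. on adjust_dialect("colorealize", "British"): A returns "colourealise", B returns "colourealize"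
import Mathlib
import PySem

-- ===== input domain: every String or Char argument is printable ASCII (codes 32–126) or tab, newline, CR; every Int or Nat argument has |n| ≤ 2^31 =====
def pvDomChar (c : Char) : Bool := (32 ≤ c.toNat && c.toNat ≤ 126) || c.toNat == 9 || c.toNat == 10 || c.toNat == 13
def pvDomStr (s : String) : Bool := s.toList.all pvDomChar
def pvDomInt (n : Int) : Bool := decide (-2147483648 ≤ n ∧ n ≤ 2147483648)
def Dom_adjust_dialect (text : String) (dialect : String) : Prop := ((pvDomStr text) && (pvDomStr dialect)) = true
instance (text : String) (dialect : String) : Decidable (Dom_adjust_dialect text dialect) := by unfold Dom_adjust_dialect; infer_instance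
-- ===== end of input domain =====

-- B replaces A's six sequential whole-string `.replace` passes by one left-to-right scan that
-- substitutes the leftmost matching key and never rescans replaced output ("alternative": same
-- cost class, a genuinely different single-pass algorithm; on overlapping keys it implements
-- the intended leftmost-match semantics, stated below as D_).

-- ===== PORT A =====
-- literal transliteration of Source A: dict literal, then `for us, uk in replacements.items(): text = text.replace(us, uk)`
def adjust_dialect (text : String) (dialect : String) : String :=
  if dialect == "British" then
    let replacements : PySem.Dict String String :=
      PySem.Dict.ofList [("color", "colour"), ("organize", "organise"), ("realize", "realise"),
                         ("behavior", "behaviour"), ("center", "centre"), ("meter", "metre")]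
    replacements.items.foldl (fun t p => PySem.Str.replace t p.1 p.2) text
  else
    text

-- ===== PORT B =====
-- transliteration of Source B: PySem has no while-loop primitive, so the `while i < n` cursor loop is
-- ported as structural recursion on the remaining suffix of the character list (exact: the cursor
-- either jumps |us| on a match or 1 otherwise); the inner `for us, uk in reps` over the six literal
-- pairs is unrolled into the six prefix tests in the same order, `break`/`else` = the if-chain.
def pyScanGo : Nat → List Char → List Char
  | _, [] => []
  | 0, l => l          -- fuel exhausted: never reached, fuel starts at len(text) and each step consumes ≥ 1 char
  | fuel+1, c :: t =>
    if "color".toList.isPrefixOf (c :: t) then "colour".toList ++ pyScanGo fuel ((c :: t).drop 5)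
    else if "organize".toList.isPrefixOf (c :: t) then "organise".toList ++ pyScanGo fuel ((c :: t).drop 8)
    else if "realize".toList.isPrefixOf (c :: t) then "realise".toList ++ pyScanGo fuel ((c :: t).drop 7)
    else if "behavior".toList.isPrefixOf (c :: t) then "behaviour".toList ++ pyScanGo fuel ((c :: t).drop 8)
    else if "center".toList.isPrefixOf (c :: t) then "centre".toList ++ pyScanGo fuel ((c :: t).drop 6)
    else if "meter".toList.isPrefixOf (c :: t) then "metre".toList ++ pyScanGo fuel ((c :: t).drop 5)
    else c :: pyScanGo fuel t

def adjust_dialect_alt (text : String) (dialect : String) : String :=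
  if dialect != "British" then text
  else String.ofList (pyScanGo text.toList.length text.toList)

-- ===== PRECONDITION & SPEC =====
-- On British texts where two replacement targets overlap (an occurrence of color/behavior/center/meter
-- immediately followed by "ealize", or of behavior followed by "ganize"), A's six sequential passes
-- substitute BOTH overlapping targets, producing a doubly-substituted hybrid; B's single
-- left-to-right pass substitutes only the leftmost target, the standard leftmost-match
-- semantics a maintainer would expect of a fixed substitution table.
def D_adjust_dialect (text : String) (dialect : String) : Prop :=
  dialect = "British" ∧
    (PySem.Str.isIn "colorealize" text = true ∨ PySem.Str.isIn "behaviorealize" text = true ∨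
     PySem.Str.isIn "centerealize" text = true ∨ PySem.Str.isIn "meterealize" text = true ∨
     PySem.Str.isIn "behaviorganize" text = true)
instance (text : String) (dialect : String) : Decidable (D_adjust_dialect text dialect) := by
  unfold D_adjust_dialect; infer_instance

def Spec_adjust_dialect (text : String) (dialect : String) (out : String) : Prop :=
  ¬ D_adjust_dialect text dialect → out = adjust_dialect_alt text dialect
instance (text : String) (dialect : String) (out : String) : Decidable (Spec_adjust_dialect text dialect out) := by
  unfold Spec_adjust_dialect; infer_instance

def pvDiffWitness_adjust_dialect : String × String := ("colorealize", "British")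
def pvDiffWitnessOut_adjust_dialect : String × String := ("colourealise", "colourealize")

-- ===== CLAIM (what is proved, stated in full; the proofs are below) =====
def Claim_unchanged_adjust_dialect : Prop := ∀ (text : String) (dialect : String), Dom_adjust_dialect text dialect → Spec_adjust_dialect text dialect (adjust_dialect text dialect)
def Claim_exact_adjust_dialect : Prop := ∀ (text : String) (dialect : String), Dom_adjust_dialect text dialect → D_adjust_dialect text dialect → adjust_dialect text dialect ≠ adjust_dialect_alt text dialect
def Claim_changed_adjust_dialect : Prop := Dom_adjust_dialect (pvDiffWitness_adjust_dialect.1) (pvDiffWitness_adjust_dialect.2) ∧ D_adjust_dialect (pvDiffWitness_adjust_dialect.1) (pvDiffWitness_adjust_dialect.2) ∧ adjust_dialect (pvDiffWitness_adjust_dialect.1) (pvDiffWitness_adjust_dialect.2) = pvDiffWitnessOut_adjust_dialect.1 ∧ adjust_dialect_alt (pvDiffWitness_adjust_dialect.1) (pvDiffWitness_adjust_dialect.2) = pvDiffWitnessOut_adjust_dialect.2 ∧ pvDiffWitnessOut_adjust_dialect.1 ≠ pvDiffWitnessOut_adjust_dialect.2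

-- ===== LEMMAS AND PROOFS =====

-- ---- proof-only abbreviations: the six (target, replacement) pairs as character lists ----
def kColor : List Char := ['c','o','l','o','r']
def vColor : List Char := ['c','o','l','o','u','r']
def kOrg : List Char := ['o','r','g','a','n','i','z','e']
def vOrg : List Char := ['o','r','g','a','n','i','s','e']
def kReal : List Char := ['r','e','a','l','i','z','e']
def vReal : List Char := ['r','e','a','l','i','s','e']
def kBeh : List Char := ['b','e','h','a','v','i','o','r']
def vBeh : List Char := ['b','e','h','a','v','i','o','u','r']
def kCen : List Char := ['c','e','n','t','e','r']
def vCen : List Char := ['c','e','n','t','r','e']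
def kMet : List Char := ['m','e','t','e','r']
def vMet : List Char := ['m','e','t','r','e']

def pvPairs : List (List Char × List Char) :=
  [(kColor, vColor), (kOrg, vOrg), (kReal, vReal), (kBeh, vBeh), (kCen, vCen), (kMet, vMet)]

-- structural version of CPython's str.replace scan (PySem.Chars.replace without the fuel/accumulator)
def repl (old new : List Char) (l : List Char) : List Char :=
  match l with
  | [] => []
  | c :: t =>
    if old.isPrefixOf (c :: t) then new ++ repl old new ((c :: t).drop (max 1 old.length))
    else c :: repl old new t
termination_by l.length
decreasing_by all_goals simp [List.length_drop]

-- the six sequential passes of A, on character lists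
def runA (t : List Char) : List Char :=
  repl kMet vMet (repl kCen vCen (repl kBeh vBeh (repl kReal vReal (repl kOrg vOrg (repl kColor vColor t)))))

def pvBadL : List (List Char) :=
  [['c','o','l','o','r','e','a','l','i','z','e'],
   ['b','e','h','a','v','i','o','r','e','a','l','i','z','e'],
   ['c','e','n','t','e','r','e','a','l','i','z','e'],
   ['m','e','t','e','r','e','a','l','i','z','e'],
   ['b','e','h','a','v','i','o','r','g','a','n','i','z','e']]

def NoBadL (t : List Char) : Prop := ∀ b ∈ pvBadL, ¬ b <:+: t

-- suffix-closed universe of "tracked" prefixes: all suffixes of the six keys and of the two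
-- overlap remainders "ealize" / "ganize"
def pvW : List (List Char) :=
  ([kColor, kOrg, kReal, kBeh, kCen, kMet,
    ['e','a','l','i','z','e'], ['g','a','n','i','z','e']].flatMap List.tails)

theorem repl_cons (old new : List Char) (c : Char) (t : List Char)
    (h : old.isPrefixOf (c :: t) = false) : repl old new (c :: t) = c :: repl old new t := by
  rw [repl, h]
  simp


theorem repl_head (old new x : List Char) (h : old ≠ []) :
    repl old new (old ++ x) = new ++ repl old new x := by
  obtain ⟨a, old', rfl⟩ := List.exists_cons_of_ne_nil h
  rw [List.cons_append, repl]
  have hpre : (a :: old').isPrefixOf (a :: (old' ++ x)) = true := by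
    rw [List.isPrefixOf_iff_prefix]
    exact ⟨x, by simp⟩
  rw [hpre]
  simp only [if_true]
  congr 1
  have hmax : max 1 (a :: old').length = (a :: old').length := by simp
  rw [hmax, ← List.cons_append, List.drop_left]


theorem repl_prefix (old new : List Char) (c : Char) (t : List Char)
    (h : old.isPrefixOf (c :: t) = true) :
    repl old new (c :: t) = new ++ repl old new (List.drop (max 1 old.length) (c :: t)) := by
  rw [repl, h]; simp

theorem go_spec (old new : List Char) (h : old ≠ []) :
    ∀ (fuel : Nat) (l acc : List Char), l.length ≤ fuel →
    PySem.Chars.replace.go old new fuel l acc = acc.reverse ++ repl old new l := by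
  intro fuel
  induction fuel with
  | zero =>
    intro l acc hl
    have : l = [] := List.eq_nil_of_length_eq_zero (Nat.le_zero.mp hl)
    subst this
    rw [PySem.Chars.replace.go, repl]
  | succ f ih =>
    intro l acc hl
    match l with
    | [] =>
      rw [PySem.Chars.replace.go, repl]
      · simp
      · omega
    | c :: t =>
      rw [PySem.Chars.replace.go]
      by_cases hp : old.isPrefixOf (c :: t) = true
      · rw [hp]
        simp only [if_true]
        have hol : 1 ≤ old.length := by
          cases old with | nil => exact absurd rfl h | cons a b => simp
        have hlen : (List.drop old.length (c :: t)).length ≤ f := by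
          simp only [List.length_drop, List.length_cons]
          simp only [List.length_cons] at hl
          omega
        rw [ih _ _ hlen]
        rw [repl_prefix old new c t hp]
        have hmx : max 1 old.length = old.length := by omega
        rw [hmx]
        simp [List.reverse_append]
      · rw [Bool.eq_false_iff.mpr hp]
        simp only [Bool.false_eq_true, if_false]
        have hlen : t.length ≤ f := by simp only [List.length_cons] at hl; omega
        rw [ih _ _ hlen]
        rw [repl_cons old new c t (Bool.eq_false_iff.mpr hp)]
        simp

theorem chars_replace_eq_repl (old new l : List Char) (h : old ≠ []) :
    PySem.Chars.replace l old new = repl old new l := by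
  rw [PySem.Chars.replace]
  have he : old.isEmpty = false := by cases old with | nil => exact absurd rfl h | cons a b => rfl
  rw [he]
  simp only [Bool.false_eq_true, if_false]
  simpa using go_spec old new h l.length l [] (le_refl _)

theorem isPrefixOf_append_split (u d x : List Char) (h : u.isPrefixOf (d ++ x) = true) :
    u.isPrefixOf d = true ∨ (d.isPrefixOf u = true ∧ (u.drop d.length).isPrefixOf x = true) := by
  induction d generalizing u with
  | nil => right; simp_all
  | cons a d' ih =>
    match u with
    | [] => left; simp
    | b :: u' =>
      rw [List.cons_append, List.isPrefixOf] at h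
      rw [Bool.and_eq_true] at h
      obtain ⟨hab, h'⟩ := h
      rcases ih u' h' with h1 | ⟨h2, h3⟩
      · left; rw [List.isPrefixOf, Bool.and_eq_true]; exact ⟨hab, h1⟩
      · right
        refine ⟨?_, ?_⟩
        · rw [List.isPrefixOf, Bool.and_eq_true]
          exact ⟨by simpa [BEq.comm] using hab, h2⟩
        · simpa using h3

theorem repl_block (old new blk x : List Char)
    (h : ∀ p < blk.length, old.isPrefixOf (blk.drop p) = false ∧
          ((blk.drop p).isPrefixOf old = false ∨ (old.drop (blk.drop p).length).isPrefixOf x = false)) :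
    repl old new (blk ++ x) = blk ++ repl old new x := by
  induction blk with
  | nil => simp
  | cons b blk' ih =>
    have h0 := h 0 (by simp)
    simp only [List.drop_zero] at h0
    have hnp : old.isPrefixOf ((b :: blk') ++ x) = false := by
      rcases Bool.eq_false_or_eq_true (old.isPrefixOf ((b :: blk') ++ x)) with ht | hf
      case inr => exact hf
      exfalso
      rcases isPrefixOf_append_split old (b :: blk') x ht with h1 | ⟨h2, h3⟩
      · rw [h0.1] at h1; exact Bool.false_ne_true h1
      · rcases h0.2 with h4 | h4
        · rw [h4] at h2; exact Bool.false_ne_true h2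
        · rw [h4] at h3; exact Bool.false_ne_true h3
    rw [List.cons_append, repl_cons old new b (blk' ++ x) hnp]
    rw [ih (fun p hp => by simpa using h (p+1) (by simpa using hp))]
    rfl

theorem factF1 : ∀ w ∈ pvW, ∀ pr ∈ pvPairs, w.isPrefixOf pr.2 = true → w.isPrefixOf pr.1 = true := by decide
theorem factF2 : ∀ w ∈ pvW, ∀ pr ∈ pvPairs, pr.2.isPrefixOf w = false := by decide
theorem factF3 : ∀ w ∈ pvW, w.tail ∈ pvW := by decide

-- no tracked prefix is ever created at the front by a replace pass
theorem repl_reflect (us uk : List Char) (hp : (us, uk) ∈ pvPairs) :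
    ∀ (l w : List Char), w ∈ pvW → w.isPrefixOf (repl us uk l) = true → w.isPrefixOf l = true := by
  intro l
  induction l with
  | nil => intro w _ h; rw [repl] at h; exact h
  | cons c t ih =>
    intro w hw h
    by_cases hpre : us.isPrefixOf (c :: t) = true
    · rw [repl_prefix _ _ _ _ hpre] at h
      rcases isPrefixOf_append_split w uk _ h with h1 | ⟨h2, _⟩
      · have h3 : w.isPrefixOf us = true := factF1 w hw (us, uk) hp h1
        rw [List.isPrefixOf_iff_prefix] at h3 hpre ⊢
        exact h3.trans hpre
      · rw [factF2 w hw (us, uk) hp] at h2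
        exact absurd h2 Bool.false_ne_true
    · rw [repl_cons _ _ _ _ (Bool.eq_false_iff.mpr hpre)] at h
      match w with
      | [] => simp
      | b :: w' =>
        rw [List.isPrefixOf, Bool.and_eq_true] at h ⊢
        obtain ⟨hb, hw'⟩ := h
        exact ⟨hb, ih w' (factF3 (b :: w') hw) hw'⟩

theorem NoBadL_suffix (t s : List Char) (hs : s <:+ t) (h : NoBadL t) : NoBadL s :=
  fun b hb hinf => h b hb (hinf.trans hs.isInfix)

theorem prefix_cons_reflect (k : List Char) (hkW : k.tail ∈ pvW) (c : Char) (y us uk : List Char)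
    (hp : (us, uk) ∈ pvPairs) (h : k.isPrefixOf (c :: repl us uk y) = true) :
    k.isPrefixOf (c :: y) = true := by
  match k with
  | [] => rfl
  | b :: k' =>
    rw [List.isPrefixOf, Bool.and_eq_true] at h ⊢
    exact ⟨h.1, repl_reflect us uk hp y k' hkW h.2⟩

theorem not_prefix_cons_repl (k : List Char) (hkW : k.tail ∈ pvW) (c : Char) (y us uk : List Char)
    (hp : (us, uk) ∈ pvPairs) (h : k.isPrefixOf (c :: y) = false) :
    k.isPrefixOf (c :: repl us uk y) = false := by
  rcases Bool.eq_false_or_eq_true (k.isPrefixOf (c :: repl us uk y)) with ht | hf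
  · rw [prefix_cons_reflect k hkW c y us uk hp ht] at h
    exact absurd h (by decide)
  · exact hf

theorem runA_nil : runA [] = [] := by
  unfold runA
  rw [repl, repl, repl, repl, repl, repl]

theorem runA_cons (c : Char) (ts : List Char)
    (hno : ∀ pr ∈ pvPairs, pr.1.isPrefixOf (c :: ts) = false) :
    runA (c :: ts) = c :: runA ts := by
  have m1 : ((kColor, vColor) : List Char × List Char) ∈ pvPairs := by decide
  have m2 : ((kOrg, vOrg) : List Char × List Char) ∈ pvPairs := by decide
  have m3 : ((kReal, vReal) : List Char × List Char) ∈ pvPairs := by decide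
  have m4 : ((kBeh, vBeh) : List Char × List Char) ∈ pvPairs := by decide
  have m5 : ((kCen, vCen) : List Char × List Char) ∈ pvPairs := by decide
  have m6 : ((kMet, vMet) : List Char × List Char) ∈ pvPairs := by decide
  have h1 := hno _ m1
  have h2 := not_prefix_cons_repl kOrg (by decide) c _ kColor vColor m1 (hno _ m2)
  have h3 := not_prefix_cons_repl kReal (by decide) c _ kOrg vOrg m2
    (not_prefix_cons_repl kReal (by decide) c _ kColor vColor m1 (hno _ m3))
  have h4 := not_prefix_cons_repl kBeh (by decide) c _ kReal vReal m3
    (not_prefix_cons_repl kBeh (by decide) c _ kOrg vOrg m2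
      (not_prefix_cons_repl kBeh (by decide) c _ kColor vColor m1 (hno _ m4)))
  have h5 := not_prefix_cons_repl kCen (by decide) c _ kBeh vBeh m4
    (not_prefix_cons_repl kCen (by decide) c _ kReal vReal m3
      (not_prefix_cons_repl kCen (by decide) c _ kOrg vOrg m2
        (not_prefix_cons_repl kCen (by decide) c _ kColor vColor m1 (hno _ m5))))
  have h6 := not_prefix_cons_repl kMet (by decide) c _ kCen vCen m5
    (not_prefix_cons_repl kMet (by decide) c _ kBeh vBeh m4
      (not_prefix_cons_repl kMet (by decide) c _ kReal vReal m3
        (not_prefix_cons_repl kMet (by decide) c _ kOrg vOrg m2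
          (not_prefix_cons_repl kMet (by decide) c _ kColor vColor m1 (hno _ m6)))))
  unfold runA
  rw [repl_cons _ _ _ _ h1, repl_cons _ _ _ _ h2, repl_cons _ _ _ _ h3,
      repl_cons _ _ _ _ h4, repl_cons _ _ _ _ h5, repl_cons _ _ _ _ h6]

def ealize : List Char := ['e','a','l','i','z','e']
def ganize : List Char := ['g','a','n','i','z','e']

theorem runA_color (s : List Char)
    (hE : ealize.isPrefixOf (repl kOrg vOrg (repl kColor vColor s)) = false) :
    runA (kColor ++ s) = vColor ++ runA s := by
  unfold runA
  rw [repl_head kColor vColor s (by decide)]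
  rw [repl_block kOrg vOrg vColor _ (by
    intro p hp; simp only [kColor, vColor, kOrg, vOrg, kReal, vReal, kBeh, vBeh, kCen, vCen, kMet, vMet, List.length_cons, List.length_nil] at hp; interval_cases p <;> exact ⟨by decide, Or.inl (by decide)⟩)]
  rw [repl_block kReal vReal vColor _ (by
    intro p hp; simp only [kColor, vColor, kOrg, vOrg, kReal, vReal, kBeh, vBeh, kCen, vCen, kMet, vMet, List.length_cons, List.length_nil] at hp; interval_cases p <;> first
      | exact ⟨by decide, Or.inl (by decide)⟩
      | exact ⟨by decide, Or.inr hE⟩)]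
  rw [repl_block kBeh vBeh vColor _ (by
    intro p hp; simp only [kColor, vColor, kOrg, vOrg, kReal, vReal, kBeh, vBeh, kCen, vCen, kMet, vMet, List.length_cons, List.length_nil] at hp; interval_cases p <;> exact ⟨by decide, Or.inl (by decide)⟩)]
  rw [repl_block kCen vCen vColor _ (by
    intro p hp; simp only [kColor, vColor, kOrg, vOrg, kReal, vReal, kBeh, vBeh, kCen, vCen, kMet, vMet, List.length_cons, List.length_nil] at hp; interval_cases p <;> exact ⟨by decide, Or.inl (by decide)⟩)]
  rw [repl_block kMet vMet vColor _ (by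
    intro p hp; simp only [kColor, vColor, kOrg, vOrg, kReal, vReal, kBeh, vBeh, kCen, vCen, kMet, vMet, List.length_cons, List.length_nil] at hp; interval_cases p <;> exact ⟨by decide, Or.inl (by decide)⟩)]

theorem runA_org (s : List Char) :
    runA (kOrg ++ s) = vOrg ++ runA s := by
  unfold runA
  rw [repl_block kColor vColor kOrg _ (by
    intro p hp; simp only [kColor, vColor, kOrg, vOrg, kReal, vReal, kBeh, vBeh, kCen, vCen, kMet, vMet, List.length_cons, List.length_nil] at hp; interval_cases p <;> exact ⟨by decide, Or.inl (by decide)⟩)]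
  rw [repl_head kOrg vOrg _ (by decide)]
  rw [repl_block kReal vReal vOrg _ (by
    intro p hp; simp only [kColor, vColor, kOrg, vOrg, kReal, vReal, kBeh, vBeh, kCen, vCen, kMet, vMet, List.length_cons, List.length_nil] at hp; interval_cases p <;> exact ⟨by decide, Or.inl (by decide)⟩)]
  rw [repl_block kBeh vBeh vOrg _ (by
    intro p hp; simp only [kColor, vColor, kOrg, vOrg, kReal, vReal, kBeh, vBeh, kCen, vCen, kMet, vMet, List.length_cons, List.length_nil] at hp; interval_cases p <;> exact ⟨by decide, Or.inl (by decide)⟩)]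
  rw [repl_block kCen vCen vOrg _ (by
    intro p hp; simp only [kColor, vColor, kOrg, vOrg, kReal, vReal, kBeh, vBeh, kCen, vCen, kMet, vMet, List.length_cons, List.length_nil] at hp; interval_cases p <;> exact ⟨by decide, Or.inl (by decide)⟩)]
  rw [repl_block kMet vMet vOrg _ (by
    intro p hp; simp only [kColor, vColor, kOrg, vOrg, kReal, vReal, kBeh, vBeh, kCen, vCen, kMet, vMet, List.length_cons, List.length_nil] at hp; interval_cases p <;> exact ⟨by decide, Or.inl (by decide)⟩)]

theorem runA_real (s : List Char) :
    runA (kReal ++ s) = vReal ++ runA s := by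
  unfold runA
  rw [repl_block kColor vColor kReal _ (by
    intro p hp; simp only [kColor, vColor, kOrg, vOrg, kReal, vReal, kBeh, vBeh, kCen, vCen, kMet, vMet, List.length_cons, List.length_nil] at hp; interval_cases p <;> exact ⟨by decide, Or.inl (by decide)⟩)]
  rw [repl_block kOrg vOrg kReal _ (by
    intro p hp; simp only [kColor, vColor, kOrg, vOrg, kReal, vReal, kBeh, vBeh, kCen, vCen, kMet, vMet, List.length_cons, List.length_nil] at hp; interval_cases p <;> exact ⟨by decide, Or.inl (by decide)⟩)]
  rw [repl_head kReal vReal _ (by decide)]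
  rw [repl_block kBeh vBeh vReal _ (by
    intro p hp; simp only [kColor, vColor, kOrg, vOrg, kReal, vReal, kBeh, vBeh, kCen, vCen, kMet, vMet, List.length_cons, List.length_nil] at hp; interval_cases p <;> exact ⟨by decide, Or.inl (by decide)⟩)]
  rw [repl_block kCen vCen vReal _ (by
    intro p hp; simp only [kColor, vColor, kOrg, vOrg, kReal, vReal, kBeh, vBeh, kCen, vCen, kMet, vMet, List.length_cons, List.length_nil] at hp; interval_cases p <;> exact ⟨by decide, Or.inl (by decide)⟩)]
  rw [repl_block kMet vMet vReal _ (by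
    intro p hp; simp only [kColor, vColor, kOrg, vOrg, kReal, vReal, kBeh, vBeh, kCen, vCen, kMet, vMet, List.length_cons, List.length_nil] at hp; interval_cases p <;> exact ⟨by decide, Or.inl (by decide)⟩)]

theorem runA_beh (s : List Char)
    (hG : ganize.isPrefixOf (repl kColor vColor s) = false)
    (hE : ealize.isPrefixOf (repl kOrg vOrg (repl kColor vColor s)) = false) :
    runA (kBeh ++ s) = vBeh ++ runA s := by
  unfold runA
  rw [repl_block kColor vColor kBeh _ (by
    intro p hp; simp only [kColor, vColor, kOrg, vOrg, kReal, vReal, kBeh, vBeh, kCen, vCen, kMet, vMet, List.length_cons, List.length_nil] at hp; interval_cases p <;> exact ⟨by decide, Or.inl (by decide)⟩)]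
  rw [repl_block kOrg vOrg kBeh _ (by
    intro p hp; simp only [kColor, vColor, kOrg, vOrg, kReal, vReal, kBeh, vBeh, kCen, vCen, kMet, vMet, List.length_cons, List.length_nil] at hp; interval_cases p <;> first
      | exact ⟨by decide, Or.inl (by decide)⟩
      | exact ⟨by decide, Or.inr hG⟩)]
  rw [repl_block kReal vReal kBeh _ (by
    intro p hp; simp only [kColor, vColor, kOrg, vOrg, kReal, vReal, kBeh, vBeh, kCen, vCen, kMet, vMet, List.length_cons, List.length_nil] at hp; interval_cases p <;> first
      | exact ⟨by decide, Or.inl (by decide)⟩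
      | exact ⟨by decide, Or.inr hE⟩)]
  rw [repl_head kBeh vBeh _ (by decide)]
  rw [repl_block kCen vCen vBeh _ (by
    intro p hp; simp only [kColor, vColor, kOrg, vOrg, kReal, vReal, kBeh, vBeh, kCen, vCen, kMet, vMet, List.length_cons, List.length_nil] at hp; interval_cases p <;> exact ⟨by decide, Or.inl (by decide)⟩)]
  rw [repl_block kMet vMet vBeh _ (by
    intro p hp; simp only [kColor, vColor, kOrg, vOrg, kReal, vReal, kBeh, vBeh, kCen, vCen, kMet, vMet, List.length_cons, List.length_nil] at hp; interval_cases p <;> exact ⟨by decide, Or.inl (by decide)⟩)]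

theorem runA_cen (s : List Char)
    (hE : ealize.isPrefixOf (repl kOrg vOrg (repl kColor vColor s)) = false) :
    runA (kCen ++ s) = vCen ++ runA s := by
  unfold runA
  rw [repl_block kColor vColor kCen _ (by
    intro p hp; simp only [kColor, vColor, kOrg, vOrg, kReal, vReal, kBeh, vBeh, kCen, vCen, kMet, vMet, List.length_cons, List.length_nil] at hp; interval_cases p <;> exact ⟨by decide, Or.inl (by decide)⟩)]
  rw [repl_block kOrg vOrg kCen _ (by
    intro p hp; simp only [kColor, vColor, kOrg, vOrg, kReal, vReal, kBeh, vBeh, kCen, vCen, kMet, vMet, List.length_cons, List.length_nil] at hp; interval_cases p <;> exact ⟨by decide, Or.inl (by decide)⟩)]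
  rw [repl_block kReal vReal kCen _ (by
    intro p hp; simp only [kColor, vColor, kOrg, vOrg, kReal, vReal, kBeh, vBeh, kCen, vCen, kMet, vMet, List.length_cons, List.length_nil] at hp; interval_cases p <;> first
      | exact ⟨by decide, Or.inl (by decide)⟩
      | exact ⟨by decide, Or.inr hE⟩)]
  rw [repl_block kBeh vBeh kCen _ (by
    intro p hp; simp only [kColor, vColor, kOrg, vOrg, kReal, vReal, kBeh, vBeh, kCen, vCen, kMet, vMet, List.length_cons, List.length_nil] at hp; interval_cases p <;> exact ⟨by decide, Or.inl (by decide)⟩)]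
  rw [repl_head kCen vCen _ (by decide)]
  rw [repl_block kMet vMet vCen _ (by
    intro p hp; simp only [kColor, vColor, kOrg, vOrg, kReal, vReal, kBeh, vBeh, kCen, vCen, kMet, vMet, List.length_cons, List.length_nil] at hp; interval_cases p <;> exact ⟨by decide, Or.inl (by decide)⟩)]

theorem runA_met (s : List Char)
    (hE : ealize.isPrefixOf (repl kOrg vOrg (repl kColor vColor s)) = false) :
    runA (kMet ++ s) = vMet ++ runA s := by
  unfold runA
  rw [repl_block kColor vColor kMet _ (by
    intro p hp; simp only [kColor, vColor, kOrg, vOrg, kReal, vReal, kBeh, vBeh, kCen, vCen, kMet, vMet, List.length_cons, List.length_nil] at hp; interval_cases p <;> exact ⟨by decide, Or.inl (by decide)⟩)]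
  rw [repl_block kOrg vOrg kMet _ (by
    intro p hp; simp only [kColor, vColor, kOrg, vOrg, kReal, vReal, kBeh, vBeh, kCen, vCen, kMet, vMet, List.length_cons, List.length_nil] at hp; interval_cases p <;> exact ⟨by decide, Or.inl (by decide)⟩)]
  rw [repl_block kReal vReal kMet _ (by
    intro p hp; simp only [kColor, vColor, kOrg, vOrg, kReal, vReal, kBeh, vBeh, kCen, vCen, kMet, vMet, List.length_cons, List.length_nil] at hp; interval_cases p <;> first
      | exact ⟨by decide, Or.inl (by decide)⟩
      | exact ⟨by decide, Or.inr hE⟩)]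
  rw [repl_block kBeh vBeh kMet _ (by
    intro p hp; simp only [kColor, vColor, kOrg, vOrg, kReal, vReal, kBeh, vBeh, kCen, vCen, kMet, vMet, List.length_cons, List.length_nil] at hp; interval_cases p <;> exact ⟨by decide, Or.inl (by decide)⟩)]
  rw [repl_block kCen vCen kMet _ (by
    intro p hp; simp only [kColor, vColor, kOrg, vOrg, kReal, vReal, kBeh, vBeh, kCen, vCen, kMet, vMet, List.length_cons, List.length_nil] at hp; interval_cases p <;> exact ⟨by decide, Or.inl (by decide)⟩)]
  rw [repl_head kMet vMet _ (by decide)]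

def pColou : List Char := ['c','o','l','o','u']
def pBehavio : List Char := ['b','e','h','a','v','i','o']
def pCente : List Char := ['c','e','n','t','e']
def pMete : List Char := ['m','e','t','e']
def pBehavi : List Char := ['b','e','h','a','v','i']
def ealise : List Char := ['e','a','l','i','s','e']
def ganise : List Char := ['g','a','n','i','s','e']

def HasBadL (t : List Char) : Prop := ∃ b ∈ pvBadL, b <:+: t

theorem neq_of_prefix_diff (a b x y : List Char) (hlen : a.length = b.length) (hne : a ≠ b) :
    a ++ x ≠ b ++ y := by
  intro h
  have := congrArg (List.take a.length) h
  rw [List.take_left, hlen, List.take_left] at this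
  exact hne this

theorem runAb_color (s' : List Char) :
    runA (kColor ++ (ealize ++ s')) = (pColou ++ vReal) ++ runA s' := by
  unfold runA
  rw [repl_head kColor vColor _ (by decide)]
  rw [repl_block kColor vColor ealize s' (by
    intro p hp; simp only [ealize, List.length_cons, List.length_nil] at hp
    interval_cases p <;> exact ⟨by decide, Or.inl (by decide)⟩)]
  rw [show ∀ X : List Char, vColor ++ (ealize ++ X) = (vColor ++ ealize) ++ X from
    fun X => (List.append_assoc _ _ _).symm]
  rw [repl_block kOrg vOrg (vColor ++ ealize) _ (by
    intro p hp
    simp only [vColor, ealize, List.length_append, List.length_cons, List.length_nil] at hp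
    interval_cases p <;> exact ⟨by decide, Or.inl (by decide)⟩)]
  rw [show ∀ X : List Char, (vColor ++ ealize) ++ X = pColou ++ (kReal ++ X) from
    fun X => by rw [show vColor ++ ealize = pColou ++ kReal from by decide, List.append_assoc]]
  rw [repl_block kReal vReal pColou _ (by
    intro p hp; simp only [pColou, List.length_cons, List.length_nil] at hp
    interval_cases p <;> exact ⟨by decide, Or.inl (by decide)⟩)]
  rw [repl_head kReal vReal _ (by decide)]
  rw [show ∀ X : List Char, pColou ++ (vReal ++ X) = (pColou ++ vReal) ++ X from
    fun X => (List.append_assoc _ _ _).symm]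
  rw [repl_block kBeh vBeh (pColou ++ vReal) _ (by
    intro p hp
    simp only [pColou, vReal, List.length_append, List.length_cons, List.length_nil] at hp
    interval_cases p <;> exact ⟨by decide, Or.inl (by decide)⟩)]
  rw [repl_block kCen vCen (pColou ++ vReal) _ (by
    intro p hp
    simp only [pColou, vReal, List.length_append, List.length_cons, List.length_nil] at hp
    interval_cases p <;> exact ⟨by decide, Or.inl (by decide)⟩)]
  rw [repl_block kMet vMet (pColou ++ vReal) _ (by
    intro p hp
    simp only [pColou, vReal, List.length_append, List.length_cons, List.length_nil] at hp
    interval_cases p <;> exact ⟨by decide, Or.inl (by decide)⟩)]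

theorem runAb_behE (s' : List Char) :
    runA (kBeh ++ (ealize ++ s')) = (vBeh ++ ealise) ++ runA s' := by
  unfold runA
  rw [show ∀ X : List Char, kBeh ++ (ealize ++ X) = (kBeh ++ ealize) ++ X from
    fun X => (List.append_assoc _ _ _).symm]
  rw [repl_block kColor vColor (kBeh ++ ealize) _ (by
    intro p hp
    simp only [kBeh, ealize, List.length_append, List.length_cons, List.length_nil] at hp
    interval_cases p <;> exact ⟨by decide, Or.inl (by decide)⟩)]
  rw [repl_block kOrg vOrg (kBeh ++ ealize) _ (by
    intro p hp
    simp only [kBeh, ealize, List.length_append, List.length_cons, List.length_nil] at hp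
    interval_cases p <;> exact ⟨by decide, Or.inl (by decide)⟩)]
  rw [show ∀ X : List Char, (kBeh ++ ealize) ++ X = pBehavio ++ (kReal ++ X) from
    fun X => by rw [show kBeh ++ ealize = pBehavio ++ kReal from by decide, List.append_assoc]]
  rw [repl_block kReal vReal pBehavio _ (by
    intro p hp; simp only [pBehavio, List.length_cons, List.length_nil] at hp
    interval_cases p <;> exact ⟨by decide, Or.inl (by decide)⟩)]
  rw [repl_head kReal vReal _ (by decide)]
  rw [show ∀ X : List Char, pBehavio ++ (vReal ++ X) = kBeh ++ (ealise ++ X) from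
    fun X => by rw [← List.append_assoc, show pBehavio ++ vReal = kBeh ++ ealise from by decide,
      List.append_assoc]]
  rw [repl_head kBeh vBeh _ (by decide)]
  rw [repl_block kBeh vBeh ealise _ (by
    intro p hp; simp only [ealise, List.length_cons, List.length_nil] at hp
    interval_cases p <;> exact ⟨by decide, Or.inl (by decide)⟩)]
  rw [show ∀ X : List Char, vBeh ++ (ealise ++ X) = (vBeh ++ ealise) ++ X from
    fun X => (List.append_assoc _ _ _).symm]
  rw [repl_block kCen vCen (vBeh ++ ealise) _ (by
    intro p hp
    simp only [vBeh, ealise, List.length_append, List.length_cons, List.length_nil] at hp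
    interval_cases p <;> exact ⟨by decide, Or.inl (by decide)⟩)]
  rw [repl_block kMet vMet (vBeh ++ ealise) _ (by
    intro p hp
    simp only [vBeh, ealise, List.length_append, List.length_cons, List.length_nil] at hp
    interval_cases p <;> exact ⟨by decide, Or.inl (by decide)⟩)]

theorem runAb_cen (s' : List Char) :
    runA (kCen ++ (ealize ++ s')) = (vCen ++ ealise) ++ runA s' := by
  unfold runA
  rw [show ∀ X : List Char, kCen ++ (ealize ++ X) = (kCen ++ ealize) ++ X from
    fun X => (List.append_assoc _ _ _).symm]
  rw [repl_block kColor vColor (kCen ++ ealize) _ (by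
    intro p hp
    simp only [kCen, ealize, List.length_append, List.length_cons, List.length_nil] at hp
    interval_cases p <;> exact ⟨by decide, Or.inl (by decide)⟩)]
  rw [repl_block kOrg vOrg (kCen ++ ealize) _ (by
    intro p hp
    simp only [kCen, ealize, List.length_append, List.length_cons, List.length_nil] at hp
    interval_cases p <;> exact ⟨by decide, Or.inl (by decide)⟩)]
  rw [show ∀ X : List Char, (kCen ++ ealize) ++ X = pCente ++ (kReal ++ X) from
    fun X => by rw [show kCen ++ ealize = pCente ++ kReal from by decide, List.append_assoc]]
  rw [repl_block kReal vReal pCente _ (by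
    intro p hp; simp only [pCente, List.length_cons, List.length_nil] at hp
    interval_cases p <;> exact ⟨by decide, Or.inl (by decide)⟩)]
  rw [repl_head kReal vReal _ (by decide)]
  rw [show ∀ X : List Char, pCente ++ (vReal ++ X) = (pCente ++ vReal) ++ X from
    fun X => (List.append_assoc _ _ _).symm]
  rw [repl_block kBeh vBeh (pCente ++ vReal) _ (by
    intro p hp
    simp only [pCente, vReal, List.length_append, List.length_cons, List.length_nil] at hp
    interval_cases p <;> exact ⟨by decide, Or.inl (by decide)⟩)]
  rw [show ∀ X : List Char, (pCente ++ vReal) ++ X = kCen ++ (ealise ++ X) from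
    fun X => by rw [show pCente ++ vReal = kCen ++ ealise from by decide, List.append_assoc]]
  rw [repl_head kCen vCen _ (by decide)]
  rw [repl_block kCen vCen ealise _ (by
    intro p hp; simp only [ealise, List.length_cons, List.length_nil] at hp
    interval_cases p <;> exact ⟨by decide, Or.inl (by decide)⟩)]
  rw [show ∀ X : List Char, vCen ++ (ealise ++ X) = (vCen ++ ealise) ++ X from
    fun X => (List.append_assoc _ _ _).symm]
  rw [repl_block kMet vMet (vCen ++ ealise) _ (by
    intro p hp
    simp only [vCen, ealise, List.length_append, List.length_cons, List.length_nil] at hp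
    interval_cases p <;> exact ⟨by decide, Or.inl (by decide)⟩)]

theorem runAb_met (s' : List Char) :
    runA (kMet ++ (ealize ++ s')) = (vMet ++ ealise) ++ runA s' := by
  unfold runA
  rw [show ∀ X : List Char, kMet ++ (ealize ++ X) = (kMet ++ ealize) ++ X from
    fun X => (List.append_assoc _ _ _).symm]
  rw [repl_block kColor vColor (kMet ++ ealize) _ (by
    intro p hp
    simp only [kMet, ealize, List.length_append, List.length_cons, List.length_nil] at hp
    interval_cases p <;> exact ⟨by decide, Or.inl (by decide)⟩)]
  rw [repl_block kOrg vOrg (kMet ++ ealize) _ (by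
    intro p hp
    simp only [kMet, ealize, List.length_append, List.length_cons, List.length_nil] at hp
    interval_cases p <;> exact ⟨by decide, Or.inl (by decide)⟩)]
  rw [show ∀ X : List Char, (kMet ++ ealize) ++ X = pMete ++ (kReal ++ X) from
    fun X => by rw [show kMet ++ ealize = pMete ++ kReal from by decide, List.append_assoc]]
  rw [repl_block kReal vReal pMete _ (by
    intro p hp; simp only [pMete, List.length_cons, List.length_nil] at hp
    interval_cases p <;> exact ⟨by decide, Or.inl (by decide)⟩)]
  rw [repl_head kReal vReal _ (by decide)]
  rw [show ∀ X : List Char, pMete ++ (vReal ++ X) = (pMete ++ vReal) ++ X from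
    fun X => (List.append_assoc _ _ _).symm]
  rw [repl_block kBeh vBeh (pMete ++ vReal) _ (by
    intro p hp
    simp only [pMete, vReal, List.length_append, List.length_cons, List.length_nil] at hp
    interval_cases p <;> exact ⟨by decide, Or.inl (by decide)⟩)]
  rw [repl_block kCen vCen (pMete ++ vReal) _ (by
    intro p hp
    simp only [pMete, vReal, List.length_append, List.length_cons, List.length_nil] at hp
    interval_cases p <;> exact ⟨by decide, Or.inl (by decide)⟩)]
  rw [show ∀ X : List Char, (pMete ++ vReal) ++ X = kMet ++ (ealise ++ X) from
    fun X => by rw [show pMete ++ vReal = kMet ++ ealise from by decide, List.append_assoc]]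
  rw [repl_head kMet vMet _ (by decide)]
  rw [repl_block kMet vMet ealise _ (by
    intro p hp; simp only [ealise, List.length_cons, List.length_nil] at hp
    interval_cases p <;> exact ⟨by decide, Or.inl (by decide)⟩)]
  rw [show ∀ X : List Char, vMet ++ (ealise ++ X) = (vMet ++ ealise) ++ X from
    fun X => (List.append_assoc _ _ _).symm]

theorem runAb_behG (s' : List Char) :
    runA (kBeh ++ (ganize ++ s')) = (vBeh ++ ganise) ++ runA s' := by
  unfold runA
  rw [show ∀ X : List Char, kBeh ++ (ganize ++ X) = (kBeh ++ ganize) ++ X from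
    fun X => (List.append_assoc _ _ _).symm]
  rw [repl_block kColor vColor (kBeh ++ ganize) _ (by
    intro p hp
    simp only [kBeh, ganize, List.length_append, List.length_cons, List.length_nil] at hp
    interval_cases p <;> exact ⟨by decide, Or.inl (by decide)⟩)]
  rw [show ∀ X : List Char, (kBeh ++ ganize) ++ X = pBehavi ++ (kOrg ++ X) from
    fun X => by rw [show kBeh ++ ganize = pBehavi ++ kOrg from by decide, List.append_assoc]]
  rw [repl_block kOrg vOrg pBehavi _ (by
    intro p hp; simp only [pBehavi, List.length_cons, List.length_nil] at hp
    interval_cases p <;> exact ⟨by decide, Or.inl (by decide)⟩)]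
  rw [repl_head kOrg vOrg _ (by decide)]
  rw [show ∀ X : List Char, pBehavi ++ (vOrg ++ X) = (pBehavi ++ vOrg) ++ X from
    fun X => (List.append_assoc _ _ _).symm]
  rw [repl_block kReal vReal (pBehavi ++ vOrg) _ (by
    intro p hp
    simp only [pBehavi, vOrg, List.length_append, List.length_cons, List.length_nil] at hp
    interval_cases p <;> exact ⟨by decide, Or.inl (by decide)⟩)]
  rw [show ∀ X : List Char, (pBehavi ++ vOrg) ++ X = kBeh ++ (ganise ++ X) from
    fun X => by rw [show pBehavi ++ vOrg = kBeh ++ ganise from by decide, List.append_assoc]]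
  rw [repl_head kBeh vBeh _ (by decide)]
  rw [repl_block kBeh vBeh ganise _ (by
    intro p hp; simp only [ganise, List.length_cons, List.length_nil] at hp
    interval_cases p <;> exact ⟨by decide, Or.inl (by decide)⟩)]
  rw [show ∀ X : List Char, vBeh ++ (ganise ++ X) = (vBeh ++ ganise) ++ X from
    fun X => (List.append_assoc _ _ _).symm]
  rw [repl_block kCen vCen (vBeh ++ ganise) _ (by
    intro p hp
    simp only [vBeh, ganise, List.length_append, List.length_cons, List.length_nil] at hp
    interval_cases p <;> exact ⟨by decide, Or.inl (by decide)⟩)]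
  rw [repl_block kMet vMet (vBeh ++ ganise) _ (by
    intro p hp
    simp only [vBeh, ganise, List.length_append, List.length_cons, List.length_nil] at hp
    interval_cases p <;> exact ⟨by decide, Or.inl (by decide)⟩)]

theorem sColor : "color".toList = kColor := rfl
theorem svColor : "colour".toList = vColor := rfl
theorem sOrg : "organize".toList = kOrg := rfl
theorem svOrg : "organise".toList = vOrg := rfl
theorem sReal : "realize".toList = kReal := rfl
theorem svReal : "realise".toList = vReal := rfl
theorem sBeh : "behavior".toList = kBeh := rfl
theorem svBeh : "behaviour".toList = vBeh := rfl
theorem sCen : "center".toList = kCen := rfl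
theorem svCen : "centre".toList = vCen := rfl
theorem sMet : "meter".toList = kMet := rfl
theorem svMet : "metre".toList = vMet := rfl

theorem scan_ealize (f : Nat) (s' : List Char) :
    pyScanGo (f + 6) (ealize ++ s') = ealize ++ pyScanGo f s' := by
  show pyScanGo (f + 6) ('e'::'a'::'l'::'i'::'z'::'e'::s') = 'e'::'a'::'l'::'i'::'z'::'e':: pyScanGo f s'
  rw [pyScanGo]; simp [List.isPrefixOf]
  rw [pyScanGo]; simp [List.isPrefixOf]
  rw [pyScanGo]; simp [List.isPrefixOf]
  rw [pyScanGo]; simp [List.isPrefixOf]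
  rw [pyScanGo]; simp [List.isPrefixOf]
  rw [pyScanGo]; simp [List.isPrefixOf]

theorem scan_ganize (f : Nat) (s' : List Char) :
    pyScanGo (f + 6) (ganize ++ s') = ganize ++ pyScanGo f s' := by
  show pyScanGo (f + 6) ('g'::'a'::'n'::'i'::'z'::'e'::s') = 'g'::'a'::'n'::'i'::'z'::'e':: pyScanGo f s'
  rw [pyScanGo]; simp [List.isPrefixOf]
  rw [pyScanGo]; simp [List.isPrefixOf]
  rw [pyScanGo]; simp [List.isPrefixOf]
  rw [pyScanGo]; simp [List.isPrefixOf]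
  rw [pyScanGo]; simp [List.isPrefixOf]
  rw [pyScanGo]; simp [List.isPrefixOf]

theorem scanb_color (g : Nat) (s' : List Char) :
    pyScanGo (g + 7) (kColor ++ (ealize ++ s')) = (vColor ++ ealize) ++ pyScanGo g s' := by
  have hc : "color".toList.isPrefixOf ('c'::'o'::'l'::'o'::'r'::(ealize ++ s')) = true := by
    simp [List.isPrefixOf]
  show pyScanGo (g + 6 + 1) ('c'::'o'::'l'::'o'::'r'::(ealize ++ s')) = _
  rw [pyScanGo]
  rw [if_pos hc]
  rw [show ('c'::'o'::'l'::'o'::'r'::(ealize ++ s')).drop 5 = ealize ++ s' from rfl]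
  rw [scan_ealize, svColor, ← List.append_assoc]

theorem scanb_behE (g : Nat) (s' : List Char) :
    pyScanGo (g + 7) (kBeh ++ (ealize ++ s')) = (vBeh ++ ealize) ++ pyScanGo g s' := by
  have hc : "behavior".toList.isPrefixOf ('b'::'e'::'h'::'a'::'v'::'i'::'o'::'r'::(ealize ++ s')) = true := by
    simp [List.isPrefixOf]
  show pyScanGo (g + 6 + 1) ('b'::'e'::'h'::'a'::'v'::'i'::'o'::'r'::(ealize ++ s')) = _
  rw [pyScanGo]
  rw [if_neg (by simp [List.isPrefixOf])]
  rw [if_neg (by simp [List.isPrefixOf])]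
  rw [if_neg (by simp [List.isPrefixOf])]
  rw [if_pos hc]
  rw [show ('b'::'e'::'h'::'a'::'v'::'i'::'o'::'r'::(ealize ++ s')).drop 8 = ealize ++ s' from rfl]
  rw [scan_ealize, svBeh, ← List.append_assoc]

theorem scanb_cen (g : Nat) (s' : List Char) :
    pyScanGo (g + 7) (kCen ++ (ealize ++ s')) = (vCen ++ ealize) ++ pyScanGo g s' := by
  have hc : "center".toList.isPrefixOf ('c'::'e'::'n'::'t'::'e'::'r'::(ealize ++ s')) = true := by
    simp [List.isPrefixOf]
  show pyScanGo (g + 6 + 1) ('c'::'e'::'n'::'t'::'e'::'r'::(ealize ++ s')) = _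
  rw [pyScanGo]
  rw [if_neg (by simp [List.isPrefixOf])]
  rw [if_neg (by simp [List.isPrefixOf])]
  rw [if_neg (by simp [List.isPrefixOf])]
  rw [if_neg (by simp [List.isPrefixOf])]
  rw [if_pos hc]
  rw [show ('c'::'e'::'n'::'t'::'e'::'r'::(ealize ++ s')).drop 6 = ealize ++ s' from rfl]
  rw [scan_ealize, svCen, ← List.append_assoc]

theorem scanb_met (g : Nat) (s' : List Char) :
    pyScanGo (g + 7) (kMet ++ (ealize ++ s')) = (vMet ++ ealize) ++ pyScanGo g s' := by
  have hc : "meter".toList.isPrefixOf ('m'::'e'::'t'::'e'::'r'::(ealize ++ s')) = true := by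
    simp [List.isPrefixOf]
  show pyScanGo (g + 6 + 1) ('m'::'e'::'t'::'e'::'r'::(ealize ++ s')) = _
  rw [pyScanGo]
  rw [if_neg (by simp [List.isPrefixOf])]
  rw [if_neg (by simp [List.isPrefixOf])]
  rw [if_neg (by simp [List.isPrefixOf])]
  rw [if_neg (by simp [List.isPrefixOf])]
  rw [if_neg (by simp [List.isPrefixOf])]
  rw [if_pos hc]
  rw [show ('m'::'e'::'t'::'e'::'r'::(ealize ++ s')).drop 5 = ealize ++ s' from rfl]
  rw [scan_ealize, svMet, ← List.append_assoc]

theorem scanb_behG (g : Nat) (s' : List Char) :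
    pyScanGo (g + 7) (kBeh ++ (ganize ++ s')) = (vBeh ++ ganize) ++ pyScanGo g s' := by
  have hc : "behavior".toList.isPrefixOf ('b'::'e'::'h'::'a'::'v'::'i'::'o'::'r'::(ganize ++ s')) = true := by
    simp [List.isPrefixOf]
  show pyScanGo (g + 6 + 1) ('b'::'e'::'h'::'a'::'v'::'i'::'o'::'r'::(ganize ++ s')) = _
  rw [pyScanGo]
  rw [if_neg (by simp [List.isPrefixOf])]
  rw [if_neg (by simp [List.isPrefixOf])]
  rw [if_neg (by simp [List.isPrefixOf])]
  rw [if_pos hc]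
  rw [show ('b'::'e'::'h'::'a'::'v'::'i'::'o'::'r'::(ganize ++ s')).drop 8 = ganize ++ s' from rfl]
  rw [scan_ganize, svBeh, ← List.append_assoc]

theorem bad_shift (b : List Char) (hbm : b ∈ pvBadL) (ki : List Char)
    (hki : ki ∈ [kColor, kOrg, kReal, kBeh, kCen, kMet]) (s : List Char)
    (hinf : b <:+: ki ++ s) :
    (ki.isPrefixOf b = true ∧ (b.drop ki.length).isPrefixOf s = true) ∨ (∃ b' ∈ pvBadL, b' <:+: s) := by
  have hisin : PySem.Chars.isIn b (ki ++ s) = true := (PySem.Chars.isIn_iff_infix _ _).mpr hinf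
  obtain ⟨p, hp⟩ := (PySem.Chars.exists_prefix_drop_iff_isIn b (ki ++ s)).mpr hisin
  by_cases hcase : ki.length ≤ p
  · obtain ⟨n, rfl⟩ := Nat.exists_eq_add_of_le hcase
    rw [List.drop_length_add_append] at hp
    exact Or.inr ⟨b, hbm, hp.isInfix.trans (List.drop_suffix n s).isInfix⟩
  · have hlt := Nat.lt_of_not_le hcase
    rw [List.drop_append_of_le_length (le_of_lt hlt)] at hp
    have hp' := List.isPrefixOf_iff_prefix.mpr hp
    rcases isPrefixOf_append_split b (ki.drop p) s hp' with h1 | ⟨h2, h3⟩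
    · exfalso
      have hlb := (List.isPrefixOf_iff_prefix.mp h1).length_le
      have hlb2 : b.length ≤ ki.length := le_trans hlb (by simp)
      have hb11 : 11 ≤ b.length := by
        simp only [pvBadL, List.mem_cons, List.not_mem_nil, or_false] at hbm
        rcases hbm with rfl | rfl | rfl | rfl | rfl <;> decide
      have hki8 : ki.length ≤ 8 := by
        simp only [List.mem_cons, List.not_mem_nil, or_false] at hki
        rcases hki with rfl | rfl | rfl | rfl | rfl | rfl <;> decide
      omega
    · by_cases hp0 : p = 0
      · subst hp0
        simp only [List.drop_zero] at h2 h3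
        exact Or.inl ⟨h2, h3⟩
      · exfalso
        simp only [pvBadL, List.mem_cons, List.not_mem_nil, or_false] at hbm
        simp only [List.mem_cons, List.not_mem_nil, or_false] at hki
        rcases hbm with rfl | rfl | rfl | rfl | rfl <;>
          rcases hki with rfl | rfl | rfl | rfl | rfl | rfl <;>
          (simp only [kColor, kOrg, kReal, kBeh, kCen, kMet,
            List.length_cons, List.length_nil] at hlt;
           interval_cases p <;> first
            | exact absurd rfl hp0
            | (revert h2; decide))

theorem tight_master (t : List Char) (hb : HasBadL t) (fuel : Nat) (hf : t.length ≤ fuel) :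
    runA t ≠ pyScanGo fuel t := by
  induction fuel generalizing t with
  | zero =>
    obtain ⟨b, hbm, hinf⟩ := hb
    have h0 : t = [] := List.eq_nil_of_length_eq_zero (Nat.le_zero.mp hf)
    subst h0
    have hlen := hinf.length_le
    simp only [pvBadL, List.mem_cons, List.not_mem_nil, or_false] at hbm
    rcases hbm with rfl | rfl | rfl | rfl | rfl <;> simp at hlen
  | succ f ih =>
    match t with
    | [] =>
      obtain ⟨b, hbm, hinf⟩ := hb
      have hlen := hinf.length_le
      simp only [pvBadL, List.mem_cons, List.not_mem_nil, or_false] at hbm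
      rcases hbm with rfl | rfl | rfl | rfl | rfl <;> simp at hlen
    | c :: ts =>
      by_cases h1 : kColor.isPrefixOf (c :: ts) = true
      · obtain ⟨s, hs⟩ := List.isPrefixOf_iff_prefix.mp h1
        rw [← hs] at hb hf ⊢
        simp only [List.length_append] at hf
        by_cases hcross : ealize.isPrefixOf s = true
        · obtain ⟨s', rfl⟩ := List.isPrefixOf_iff_prefix.mp hcross
          have h7 : ∃ g, f + 1 = g + 7 := ⟨f - 6, by
            simp only [kColor, ealize, List.length_cons, List.length_nil, List.length_append] at hf
            omega⟩
          obtain ⟨g, hg⟩ := h7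
          rw [runAb_color s', hg, scanb_color]
          exact neq_of_prefix_diff _ _ _ _ (by decide) (by decide)
        · have hE : ealize.isPrefixOf (repl kOrg vOrg (repl kColor vColor s)) = false := by
            rcases Bool.eq_false_or_eq_true (ealize.isPrefixOf (repl kOrg vOrg (repl kColor vColor s))) with ht | hff
            · exact absurd (repl_reflect kColor vColor (by decide) _ ealize (by decide)
                (repl_reflect kOrg vOrg (by decide) _ ealize (by decide) ht)) hcross
            · exact hff
          rw [runA_color s hE]
          have hscan : pyScanGo (f+1) (kColor ++ s) = vColor ++ pyScanGo f s := by
            show pyScanGo (f+1) ('c'::'o'::'l'::'o'::'r'::s) = _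
            rw [pyScanGo]
            simp [List.isPrefixOf, svColor]
          rw [hscan]
          have hbs : HasBadL s := by
            obtain ⟨b, hbm, hinf⟩ := hb
            rcases bad_shift b hbm kColor (by decide) s hinf with ⟨hpk, htl⟩ | hgood
            · simp only [pvBadL, List.mem_cons, List.not_mem_nil, or_false] at hbm
              rcases hbm with rfl | rfl | rfl | rfl | rfl
              · exact absurd htl hcross
              all_goals exact absurd hpk (by decide)
            · exact hgood
          have hlen : s.length ≤ f := by
            simp only [kColor, List.length_cons, List.length_nil] at hf; omega
          exact fun heq => ih s hbs hlen (List.append_cancel_left heq)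
      · by_cases h2 : kOrg.isPrefixOf (c :: ts) = true
        · obtain ⟨s, hs⟩ := List.isPrefixOf_iff_prefix.mp h2
          rw [← hs] at hb hf ⊢
          simp only [List.length_append] at hf
          rw [runA_org s]
          have hscan : pyScanGo (f+1) (kOrg ++ s) = vOrg ++ pyScanGo f s := by
            show pyScanGo (f+1) ('o'::'r'::'g'::'a'::'n'::'i'::'z'::'e'::s) = _
            rw [pyScanGo]
            simp [List.isPrefixOf, svOrg]
          rw [hscan]
          have hbs : HasBadL s := by
            obtain ⟨b, hbm, hinf⟩ := hb
            rcases bad_shift b hbm kOrg (by decide) s hinf with ⟨hpk, htl⟩ | hgood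
            · fin_cases hbm <;> exact absurd hpk (by decide)
            · exact hgood
          have hlen : s.length ≤ f := by
            simp only [kOrg, List.length_cons, List.length_nil] at hf; omega
          exact fun heq => ih s hbs hlen (List.append_cancel_left heq)
        · by_cases h3 : kReal.isPrefixOf (c :: ts) = true
          · obtain ⟨s, hs⟩ := List.isPrefixOf_iff_prefix.mp h3
            rw [← hs] at hb hf ⊢
            simp only [List.length_append] at hf
            rw [runA_real s]
            have hscan : pyScanGo (f+1) (kReal ++ s) = vReal ++ pyScanGo f s := by
              show pyScanGo (f+1) ('r'::'e'::'a'::'l'::'i'::'z'::'e'::s) = _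
              rw [pyScanGo]
              simp [List.isPrefixOf, svReal]
            rw [hscan]
            have hbs : HasBadL s := by
              obtain ⟨b, hbm, hinf⟩ := hb
              rcases bad_shift b hbm kReal (by decide) s hinf with ⟨hpk, htl⟩ | hgood
              · simp only [pvBadL, List.mem_cons, List.not_mem_nil, or_false] at hbm
                rcases hbm with rfl | rfl | rfl | rfl | rfl <;> exact absurd hpk (by decide)
              · exact hgood
            have hlen : s.length ≤ f := by
              simp only [kReal, List.length_cons, List.length_nil] at hf; omega
            exact fun heq => ih s hbs hlen (List.append_cancel_left heq)
          · by_cases h4 : kBeh.isPrefixOf (c :: ts) = true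
            · obtain ⟨s, hs⟩ := List.isPrefixOf_iff_prefix.mp h4
              rw [← hs] at hb hf ⊢
              simp only [List.length_append] at hf
              by_cases hcrossE : ealize.isPrefixOf s = true
              · obtain ⟨s', rfl⟩ := List.isPrefixOf_iff_prefix.mp hcrossE
                obtain ⟨g, hg⟩ : ∃ g, f + 1 = g + 7 := ⟨f - 6, by
                  simp only [kBeh, ealize, List.length_cons, List.length_nil, List.length_append] at hf
                  omega⟩
                rw [runAb_behE s', hg, scanb_behE]
                exact neq_of_prefix_diff _ _ _ _ (by decide) (by decide)
              · by_cases hcrossG : ganize.isPrefixOf s = true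
                · obtain ⟨s', rfl⟩ := List.isPrefixOf_iff_prefix.mp hcrossG
                  obtain ⟨g, hg⟩ : ∃ g, f + 1 = g + 7 := ⟨f - 6, by
                    simp only [kBeh, ganize, List.length_cons, List.length_nil, List.length_append] at hf
                    omega⟩
                  rw [runAb_behG s', hg, scanb_behG]
                  exact neq_of_prefix_diff _ _ _ _ (by decide) (by decide)
                · have hG : ganize.isPrefixOf (repl kColor vColor s) = false := by
                    rcases Bool.eq_false_or_eq_true (ganize.isPrefixOf (repl kColor vColor s)) with ht | hff
                    · exact absurd (repl_reflect kColor vColor (by decide) _ ganize (by decide) ht) hcrossG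
                    · exact hff
                  have hE : ealize.isPrefixOf (repl kOrg vOrg (repl kColor vColor s)) = false := by
                    rcases Bool.eq_false_or_eq_true (ealize.isPrefixOf (repl kOrg vOrg (repl kColor vColor s))) with ht | hff
                    · exact absurd (repl_reflect kColor vColor (by decide) _ ealize (by decide)
                        (repl_reflect kOrg vOrg (by decide) _ ealize (by decide) ht)) hcrossE
                    · exact hff
                  rw [runA_beh s hG hE]
                  have hscan : pyScanGo (f+1) (kBeh ++ s) = vBeh ++ pyScanGo f s := by
                    show pyScanGo (f+1) ('b'::'e'::'h'::'a'::'v'::'i'::'o'::'r'::s) = _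
                    rw [pyScanGo]
                    simp [List.isPrefixOf, svBeh]
                  rw [hscan]
                  have hbs : HasBadL s := by
                    obtain ⟨b, hbm, hinf⟩ := hb
                    rcases bad_shift b hbm kBeh (by decide) s hinf with ⟨hpk, htl⟩ | hgood
                    · simp only [pvBadL, List.mem_cons, List.not_mem_nil, or_false] at hbm
                      rcases hbm with rfl | rfl | rfl | rfl | rfl
                      · exact absurd hpk (by decide)
                      · exact absurd htl hcrossE
                      · exact absurd hpk (by decide)
                      · exact absurd hpk (by decide)
                      · exact absurd htl hcrossG
                    · exact hgood
                  have hlen : s.length ≤ f := by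
                    simp only [kBeh, List.length_cons, List.length_nil] at hf; omega
                  exact fun heq => ih s hbs hlen (List.append_cancel_left heq)
            · by_cases h5 : kCen.isPrefixOf (c :: ts) = true
              · obtain ⟨s, hs⟩ := List.isPrefixOf_iff_prefix.mp h5
                rw [← hs] at hb hf ⊢
                simp only [List.length_append] at hf
                by_cases hcross : ealize.isPrefixOf s = true
                · obtain ⟨s', rfl⟩ := List.isPrefixOf_iff_prefix.mp hcross
                  obtain ⟨g, hg⟩ : ∃ g, f + 1 = g + 7 := ⟨f - 6, by
                    simp only [kCen, ealize, List.length_cons, List.length_nil, List.length_append] at hf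
                    omega⟩
                  rw [runAb_cen s', hg, scanb_cen]
                  exact neq_of_prefix_diff _ _ _ _ (by decide) (by decide)
                · have hE : ealize.isPrefixOf (repl kOrg vOrg (repl kColor vColor s)) = false := by
                    rcases Bool.eq_false_or_eq_true (ealize.isPrefixOf (repl kOrg vOrg (repl kColor vColor s))) with ht | hff
                    · exact absurd (repl_reflect kColor vColor (by decide) _ ealize (by decide)
                        (repl_reflect kOrg vOrg (by decide) _ ealize (by decide) ht)) hcross
                    · exact hff
                  rw [runA_cen s hE]
                  have hscan : pyScanGo (f+1) (kCen ++ s) = vCen ++ pyScanGo f s := by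
                    show pyScanGo (f+1) ('c'::'e'::'n'::'t'::'e'::'r'::s) = _
                    rw [pyScanGo]
                    simp [List.isPrefixOf, svCen]
                  rw [hscan]
                  have hbs : HasBadL s := by
                    obtain ⟨b, hbm, hinf⟩ := hb
                    rcases bad_shift b hbm kCen (by decide) s hinf with ⟨hpk, htl⟩ | hgood
                    · simp only [pvBadL, List.mem_cons, List.not_mem_nil, or_false] at hbm
                      rcases hbm with rfl | rfl | rfl | rfl | rfl
                      · exact absurd hpk (by decide)
                      · exact absurd hpk (by decide)
                      · exact absurd htl hcross
                      · exact absurd hpk (by decide)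
                      · exact absurd hpk (by decide)
                    · exact hgood
                  have hlen : s.length ≤ f := by
                    simp only [kCen, List.length_cons, List.length_nil] at hf; omega
                  exact fun heq => ih s hbs hlen (List.append_cancel_left heq)
              · by_cases h6 : kMet.isPrefixOf (c :: ts) = true
                · obtain ⟨s, hs⟩ := List.isPrefixOf_iff_prefix.mp h6
                  rw [← hs] at hb hf ⊢
                  simp only [List.length_append] at hf
                  by_cases hcross : ealize.isPrefixOf s = true
                  · obtain ⟨s', rfl⟩ := List.isPrefixOf_iff_prefix.mp hcross
                    obtain ⟨g, hg⟩ : ∃ g, f + 1 = g + 7 := ⟨f - 6, by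
                      simp only [kMet, ealize, List.length_cons, List.length_nil, List.length_append] at hf
                      omega⟩
                    rw [runAb_met s', hg, scanb_met]
                    exact neq_of_prefix_diff _ _ _ _ (by decide) (by decide)
                  · have hE : ealize.isPrefixOf (repl kOrg vOrg (repl kColor vColor s)) = false := by
                      rcases Bool.eq_false_or_eq_true (ealize.isPrefixOf (repl kOrg vOrg (repl kColor vColor s))) with ht | hff
                      · exact absurd (repl_reflect kColor vColor (by decide) _ ealize (by decide)
                          (repl_reflect kOrg vOrg (by decide) _ ealize (by decide) ht)) hcross
                      · exact hff
                    rw [runA_met s hE]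
                    have hscan : pyScanGo (f+1) (kMet ++ s) = vMet ++ pyScanGo f s := by
                      show pyScanGo (f+1) ('m'::'e'::'t'::'e'::'r'::s) = _
                      rw [pyScanGo]
                      simp [List.isPrefixOf, svMet]
                    rw [hscan]
                    have hbs : HasBadL s := by
                      obtain ⟨b, hbm, hinf⟩ := hb
                      rcases bad_shift b hbm kMet (by decide) s hinf with ⟨hpk, htl⟩ | hgood
                      · simp only [pvBadL, List.mem_cons, List.not_mem_nil, or_false] at hbm
                        rcases hbm with rfl | rfl | rfl | rfl | rfl
                        · exact absurd hpk (by decide)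
                        · exact absurd hpk (by decide)
                        · exact absurd hpk (by decide)
                        · exact absurd htl hcross
                        · exact absurd hpk (by decide)
                      · exact hgood
                    have hlen : s.length ≤ f := by
                      simp only [kMet, List.length_cons, List.length_nil] at hf; omega
                    exact fun heq => ih s hbs hlen (List.append_cancel_left heq)
                · have hno : ∀ pr ∈ pvPairs, pr.1.isPrefixOf (c :: ts) = false := by
                    intro pr hpr
                    simp only [pvPairs, List.mem_cons] at hpr
                    rcases hpr with rfl | rfl | rfl | rfl | rfl | rfl | hfalse
                    · exact Bool.eq_false_iff.mpr h1
                    · exact Bool.eq_false_iff.mpr h2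
                    · exact Bool.eq_false_iff.mpr h3
                    · exact Bool.eq_false_iff.mpr h4
                    · exact Bool.eq_false_iff.mpr h5
                    · exact Bool.eq_false_iff.mpr h6
                    · simp at hfalse
                  rw [runA_cons c ts hno]
                  have hscan : pyScanGo (f+1) (c :: ts) = c :: pyScanGo f ts := by
                    rw [pyScanGo]
                    rw [sColor, sOrg, sReal, sBeh, sCen, sMet]
                    rw [Bool.eq_false_iff.mpr h1, Bool.eq_false_iff.mpr h2, Bool.eq_false_iff.mpr h3,
                        Bool.eq_false_iff.mpr h4, Bool.eq_false_iff.mpr h5, Bool.eq_false_iff.mpr h6]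
                    simp
                  rw [hscan]
                  have hbts : HasBadL ts := by
                    obtain ⟨b, hbm, hinf⟩ := hb
                    rcases List.infix_cons_iff.mp hinf with hpre | hsuf
                    · exfalso
                      have hkey : ∀ (k : List Char), k.isPrefixOf b = true →
                          k.isPrefixOf (c :: ts) = true := fun k hk =>
                        List.isPrefixOf_iff_prefix.mpr ((List.isPrefixOf_iff_prefix.mp hk).trans hpre)
                      simp only [pvBadL, List.mem_cons, List.not_mem_nil, or_false] at hbm
                      rcases hbm with rfl | rfl | rfl | rfl | rfl
                      · exact absurd (hkey kColor (by decide)) h1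
                      · exact absurd (hkey kBeh (by decide)) h4
                      · exact absurd (hkey kCen (by decide)) h5
                      · exact absurd (hkey kMet (by decide)) h6
                      · exact absurd (hkey kBeh (by decide)) h4
                    · exact ⟨b, hbm, hsuf⟩
                  have hlen : ts.length ≤ f := by simp at hf; omega
                  intro heq
                  exact ih ts hbts hlen (by simpa using congrArg List.tail heq)

theorem master (t : List Char) (h : NoBadL t) (fuel : Nat) (hf : t.length ≤ fuel) :
    runA t = pyScanGo fuel t := by
  induction fuel generalizing t with
  | zero =>
    match t with
    | [] => rw [runA_nil]; rfl
    | c :: ts => simp at hf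
  | succ f ih =>
    match t with
    | [] => rw [runA_nil]; rfl
    | c :: ts =>
      have hEgen : ∀ k ∈ pvW, ∀ bad ∈ pvBadL, ∀ pre s : List Char, pre ++ s = c :: ts →
          pre ++ k = bad →
          k.isPrefixOf (repl kOrg vOrg (repl kColor vColor s)) = false := by
        intro k hkW bad hbad pre s hps hpk
        rcases Bool.eq_false_or_eq_true (k.isPrefixOf (repl kOrg vOrg (repl kColor vColor s))) with ht | hff
        · have e2 := repl_reflect kOrg vOrg (by decide) _ k hkW ht
          have e1 := repl_reflect kColor vColor (by decide) _ k hkW e2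
          have hinf : bad <:+: (c :: ts) := by
            rw [← hps, ← hpk]
            exact (((List.prefix_append_right_inj pre).mpr
              (List.isPrefixOf_iff_prefix.mp e1)).isInfix)
          exact absurd hinf (h bad hbad)
        · exact hff
      have hGgen : ∀ s : List Char, kBeh ++ s = c :: ts →
          ganize.isPrefixOf (repl kColor vColor s) = false := by
        intro s hps
        rcases Bool.eq_false_or_eq_true (ganize.isPrefixOf (repl kColor vColor s)) with ht | hff
        · have e1 := repl_reflect kColor vColor (by decide) _ ganize (by decide) ht
          have hinf : (kBeh ++ ganize) <:+: (c :: ts) := by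
            rw [← hps]
            exact (((List.prefix_append_right_inj kBeh).mpr
              (List.isPrefixOf_iff_prefix.mp e1)).isInfix)
          exact absurd hinf (h (kBeh ++ ganize) (by decide))
        · exact hff
      by_cases h1 : kColor.isPrefixOf (c :: ts) = true
      · obtain ⟨s, hs⟩ := List.isPrefixOf_iff_prefix.mp h1
        have hlen : s.length ≤ f := by
          have := congrArg List.length hs
          simp [kColor] at this
          simp at hf
          omega
        have hnb : NoBadL s := NoBadL_suffix _ _ ⟨kColor, hs⟩ h
        have hE := hEgen ealize (by decide) (kColor ++ ealize) (by decide) kColor s hs rfl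
        rw [← hs, runA_color s hE, ih s hnb hlen]
        show _ = pyScanGo (f+1) ('c'::'o'::'l'::'o'::'r'::s)
        rw [pyScanGo]
        simp [List.isPrefixOf, svColor]
      · by_cases h2 : kOrg.isPrefixOf (c :: ts) = true
        · obtain ⟨s, hs⟩ := List.isPrefixOf_iff_prefix.mp h2
          have hlen : s.length ≤ f := by
            have := congrArg List.length hs
            simp [kOrg] at this
            simp at hf
            omega
          have hnb : NoBadL s := NoBadL_suffix _ _ ⟨kOrg, hs⟩ h
          rw [← hs, runA_org s, ih s hnb hlen]
          show _ = pyScanGo (f+1) ('o'::'r'::'g'::'a'::'n'::'i'::'z'::'e'::s)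
          rw [pyScanGo]
          simp [List.isPrefixOf, svOrg]
        · by_cases h3 : kReal.isPrefixOf (c :: ts) = true
          · obtain ⟨s, hs⟩ := List.isPrefixOf_iff_prefix.mp h3
            have hlen : s.length ≤ f := by
              have := congrArg List.length hs
              simp [kReal] at this
              simp at hf
              omega
            have hnb : NoBadL s := NoBadL_suffix _ _ ⟨kReal, hs⟩ h
            rw [← hs, runA_real s, ih s hnb hlen]
            show _ = pyScanGo (f+1) ('r'::'e'::'a'::'l'::'i'::'z'::'e'::s)
            rw [pyScanGo]
            simp [List.isPrefixOf, svReal]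
          · by_cases h4 : kBeh.isPrefixOf (c :: ts) = true
            · obtain ⟨s, hs⟩ := List.isPrefixOf_iff_prefix.mp h4
              have hlen : s.length ≤ f := by
                have := congrArg List.length hs
                simp [kBeh] at this
                simp at hf
                omega
              have hnb : NoBadL s := NoBadL_suffix _ _ ⟨kBeh, hs⟩ h
              have hE := hEgen ealize (by decide) (kBeh ++ ealize) (by decide) kBeh s hs rfl
              have hG := hGgen s hs
              rw [← hs, runA_beh s hG hE, ih s hnb hlen]
              show _ = pyScanGo (f+1) ('b'::'e'::'h'::'a'::'v'::'i'::'o'::'r'::s)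
              rw [pyScanGo]
              simp [List.isPrefixOf, svBeh]
            · by_cases h5 : kCen.isPrefixOf (c :: ts) = true
              · obtain ⟨s, hs⟩ := List.isPrefixOf_iff_prefix.mp h5
                have hlen : s.length ≤ f := by
                  have := congrArg List.length hs
                  simp [kCen] at this
                  simp at hf
                  omega
                have hnb : NoBadL s := NoBadL_suffix _ _ ⟨kCen, hs⟩ h
                have hE := hEgen ealize (by decide) (kCen ++ ealize) (by decide) kCen s hs rfl
                rw [← hs, runA_cen s hE, ih s hnb hlen]
                show _ = pyScanGo (f+1) ('c'::'e'::'n'::'t'::'e'::'r'::s)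
                rw [pyScanGo]
                simp [List.isPrefixOf, svCen]
              · by_cases h6 : kMet.isPrefixOf (c :: ts) = true
                · obtain ⟨s, hs⟩ := List.isPrefixOf_iff_prefix.mp h6
                  have hlen : s.length ≤ f := by
                    have := congrArg List.length hs
                    simp [kMet] at this
                    simp at hf
                    omega
                  have hnb : NoBadL s := NoBadL_suffix _ _ ⟨kMet, hs⟩ h
                  have hE := hEgen ealize (by decide) (kMet ++ ealize) (by decide) kMet s hs rfl
                  rw [← hs, runA_met s hE, ih s hnb hlen]
                  show _ = pyScanGo (f+1) ('m'::'e'::'t'::'e'::'r'::s)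
                  rw [pyScanGo]
                  simp [List.isPrefixOf, svMet]
                · have hno : ∀ pr ∈ pvPairs, pr.1.isPrefixOf (c :: ts) = false := by
                    intro pr hpr
                    simp only [pvPairs, List.mem_cons] at hpr
                    rcases hpr with rfl | rfl | rfl | rfl | rfl | rfl | hfalse
                    · exact Bool.eq_false_iff.mpr h1
                    · exact Bool.eq_false_iff.mpr h2
                    · exact Bool.eq_false_iff.mpr h3
                    · exact Bool.eq_false_iff.mpr h4
                    · exact Bool.eq_false_iff.mpr h5
                    · exact Bool.eq_false_iff.mpr h6
                    · simp at hfalse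
                  have hlen : ts.length ≤ f := by simp at hf; omega
                  rw [runA_cons c ts hno, ih ts (NoBadL_suffix _ _ (List.suffix_cons c ts) h) hlen]
                  rw [pyScanGo]
                  rw [sColor, sOrg, sReal, sBeh, sCen, sMet]
                  rw [Bool.eq_false_iff.mpr h1, Bool.eq_false_iff.mpr h2, Bool.eq_false_iff.mpr h3,
                      Bool.eq_false_iff.mpr h4, Bool.eq_false_iff.mpr h5, Bool.eq_false_iff.mpr h6]
                  simp

theorem A_british_toList (text : String) :
    (adjust_dialect text "British").toList = runA text.toList := by
  unfold adjust_dialect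
  rw [show (("British" : String) == "British") = true from rfl]
  simp only [if_true]
  rw [show (PySem.Dict.ofList [("color", "colour"), ("organize", "organise"), ("realize", "realise"),
          ("behavior", "behaviour"), ("center", "centre"), ("meter", "metre")]).items.foldl
            (fun t p => PySem.Str.replace t p.1 p.2) text =
        PySem.Str.replace (PySem.Str.replace (PySem.Str.replace (PySem.Str.replace (PySem.Str.replace
          (PySem.Str.replace text "color" "colour") "organize" "organise") "realize" "realise")
          "behavior" "behaviour") "center" "centre") "meter" "metre" from rfl]
  rw [PySem.Str.toList_replace, PySem.Str.toList_replace, PySem.Str.toList_replace,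
      PySem.Str.toList_replace, PySem.Str.toList_replace, PySem.Str.toList_replace]
  rw [chars_replace_eq_repl _ _ _ (by decide), chars_replace_eq_repl _ _ _ (by decide),
      chars_replace_eq_repl _ _ _ (by decide), chars_replace_eq_repl _ _ _ (by decide),
      chars_replace_eq_repl _ _ _ (by decide), chars_replace_eq_repl _ _ _ (by decide)]
  rw [sColor, svColor, sOrg, svOrg, sReal, svReal, sBeh, svBeh, sCen, svCen, sMet, svMet]
  rfl

theorem B_british_toList (text : String) :
    (adjust_dialect_alt text "British").toList = pyScanGo text.toList.length text.toList := by
  unfold adjust_dialect_alt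
  rw [show (("British" : String) != "British") = false from rfl]
  simp only [Bool.false_eq_true, if_false]
  rw [String.toList_ofList]

-- ===== VERDICT (by name: the statement is the Claim_ definition above) =====
theorem adjust_dialect_spec : Claim_unchanged_adjust_dialect := by
  unfold Claim_unchanged_adjust_dialect
  intro text dialect _ hD
  unfold adjust_dialect adjust_dialect_alt
  by_cases hb : (dialect == "British") = true
  · have hbd : dialect = "British" := beq_iff_eq.mp hb
    have hnb : NoBadL text.toList := by
      intro bl hbl hinf
      simp only [pvBadL, List.mem_cons, List.not_mem_nil, or_false] at hbl
      rcases hbl with rfl | rfl | rfl | rfl | rfl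
      · exact hD ⟨hbd, Or.inl ((PySem.Str.isIn_iff_infix _ text).mpr hinf)⟩
      · exact hD ⟨hbd, Or.inr (Or.inl ((PySem.Str.isIn_iff_infix _ text).mpr hinf))⟩
      · exact hD ⟨hbd, Or.inr (Or.inr (Or.inl ((PySem.Str.isIn_iff_infix _ text).mpr hinf)))⟩
      · exact hD ⟨hbd, Or.inr (Or.inr (Or.inr (Or.inl ((PySem.Str.isIn_iff_infix _ text).mpr hinf))))⟩
      · exact hD ⟨hbd, Or.inr (Or.inr (Or.inr (Or.inr ((PySem.Str.isIn_iff_infix _ text).mpr hinf))))⟩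
    rw [hb]
    simp only [bne, hb, Bool.not_true, Bool.false_eq_true, if_false, if_true]
    have hfold : (PySem.Dict.ofList [("color", "colour"), ("organize", "organise"), ("realize", "realise"),
          ("behavior", "behaviour"), ("center", "centre"), ("meter", "metre")]).items.foldl
            (fun t p => PySem.Str.replace t p.1 p.2) text =
        PySem.Str.replace (PySem.Str.replace (PySem.Str.replace (PySem.Str.replace (PySem.Str.replace
          (PySem.Str.replace text "color" "colour") "organize" "organise") "realize" "realise")
          "behavior" "behaviour") "center" "centre") "meter" "metre" := rfl
    rw [hfold]
    apply String.toList_inj.mp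
    rw [String.toList_ofList]
    rw [PySem.Str.toList_replace, PySem.Str.toList_replace, PySem.Str.toList_replace,
        PySem.Str.toList_replace, PySem.Str.toList_replace, PySem.Str.toList_replace]
    rw [chars_replace_eq_repl _ _ _ (by decide), chars_replace_eq_repl _ _ _ (by decide),
        chars_replace_eq_repl _ _ _ (by decide), chars_replace_eq_repl _ _ _ (by decide),
        chars_replace_eq_repl _ _ _ (by decide), chars_replace_eq_repl _ _ _ (by decide)]
    rw [sColor, svColor, sOrg, svOrg, sReal, svReal, sBeh, svBeh, sCen, svCen, sMet, svMet]
    exact master text.toList hnb text.toList.length (le_refl _)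
  · have hb' : (dialect == "British") = false := Bool.eq_false_iff.mpr hb
    rw [hb']
    simp [bne, hb']

theorem adjust_dialect_changed : Claim_changed_adjust_dialect := by
  unfold Claim_changed_adjust_dialect; decide

theorem adjust_dialect_tight : Claim_exact_adjust_dialect := by
  unfold Claim_exact_adjust_dialect
  intro text dialect _ hD
  obtain ⟨hbd, hbads⟩ := hD
  subst hbd
  intro heq
  have htl := congrArg String.toList heq
  rw [A_british_toList, B_british_toList] at htl
  have hbad : HasBadL text.toList := by
    rcases hbads with h | h | h | h | h
    · exact ⟨['c','o','l','o','r','e','a','l','i','z','e'], by decide,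
        (PySem.Str.isIn_iff_infix _ _).mp h⟩
    · exact ⟨['b','e','h','a','v','i','o','r','e','a','l','i','z','e'], by decide,
        (PySem.Str.isIn_iff_infix _ _).mp h⟩
    · exact ⟨['c','e','n','t','e','r','e','a','l','i','z','e'], by decide,
        (PySem.Str.isIn_iff_infix _ _).mp h⟩
    · exact ⟨['m','e','t','e','r','e','a','l','i','z','e'], by decide,
        (PySem.Str.isIn_iff_infix _ _).mp h⟩
    · exact ⟨['b','e','h','a','v','i','o','r','g','a','n','i','z','e'], by decide,
        (PySem.Str.isIn_iff_infix _ _).mp h⟩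
  exact tight_master text.toList hbad _ (le_refl _) htl
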